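-- pv_equiv track=rewrite | github.com/bhwcan/showpro | src/testabove.py | allspacers
-- ===== SOURCE A (Python) =====
-- def allspacers(s):
--   spacers = { ' ', '/', '|', '↓' , '-'}
--   if not s:  # Handle empty string case
--     return False
--   for char in s:
--     if char not in spacers:
--       return False
--   return True
-- ===== SOURCE B (Python) =====
-- def allspacers(s):
--   freq = {}
--   for ch in s:
--     freq[ch] = freq.get(ch, 0) + 1
--   total = (freq.get(' ', 0) + freq.get('/', 0) + freq.get('|', 0)
--            + freq.get('\u2193', 0) + freq.get('-', 0))
--   return total == len(s) and len(s) > 0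
-- ===== Notes on version B (the rewrite author's own statement) =====
-- stated objective: alternative
-- what changed: B builds a character-frequency dictionary in one pass and decides by arithmetic (the spacer counts summing to len(s)), instead of A's short-circuit per-character membership loop.
import Mathlib
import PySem

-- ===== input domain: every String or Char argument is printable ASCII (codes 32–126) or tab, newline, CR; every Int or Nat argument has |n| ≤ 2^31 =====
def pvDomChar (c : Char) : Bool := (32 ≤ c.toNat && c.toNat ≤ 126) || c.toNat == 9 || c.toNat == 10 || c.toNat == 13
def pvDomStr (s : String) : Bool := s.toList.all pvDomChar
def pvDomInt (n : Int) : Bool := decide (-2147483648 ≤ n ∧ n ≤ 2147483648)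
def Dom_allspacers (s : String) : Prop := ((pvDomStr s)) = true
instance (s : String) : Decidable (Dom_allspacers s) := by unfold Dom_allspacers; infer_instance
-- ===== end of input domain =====

-- B builds a character-frequency dictionary in one pass and decides by arithmetic (the five
-- spacer counts summing to len(s)) instead of A's short-circuit membership loop; objective: alternative.

-- ===== PORT A =====
-- the 'for char in s: if char not in spacers: return False' loop
def allspacersLoopA (spacers : PySem.Set Char) : List Char → Bool
  | [] => true
  | c :: rest => if ¬ (PySem.Set.contains spacers c) then false else allspacersLoopA spacers rest

def allspacers (s : String) : Bool :=
  let spacers : PySem.Set Char := PySem.Set.ofList [' ', '/', '|', '↓', '-']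
  if s.toList.isEmpty then false
  else allspacersLoopA spacers s.toList

-- ===== PORT B =====
def allspacers_alt (s : String) : Bool :=
  let freq : PySem.Dict Char Int :=
    s.toList.foldl (fun d ch => d.insert ch (d.getD ch 0 + 1)) PySem.Dict.empty
  let total : Int :=
    freq.getD ' ' 0 + freq.getD '/' 0 + freq.getD '|' 0 + freq.getD '↓' 0 + freq.getD '-' 0
  decide (total = (s.toList.length : Int)) && decide (0 < s.toList.length)

-- ===== PRECONDITION & SPEC =====
def Spec_allspacers (s : String) (out : Bool) : Prop := out = allspacers_alt s
instance (s : String) (out : Bool) : Decidable (Spec_allspacers s out) := by unfold Spec_allspacers; infer_instance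

-- ===== CLAIM (what is proved, stated in full; the proofs are below) =====
def Claim_equal_allspacers : Prop := ∀ (s : String), Dom_allspacers s → Spec_allspacers s (allspacers s)

-- ===== LEMMAS AND PROOFS =====
-- A's loop is the universal membership test over the characters
lemma loopA_eq_all (sp : PySem.Set Char) (l : List Char) :
    allspacersLoopA sp l = l.all (fun c => PySem.Set.contains sp c) := by
  induction l with
  | nil => rfl
  | cons c rest ih =>
      by_cases h : PySem.Set.contains sp c <;> simp [allspacersLoopA, ih]

-- the five spacer counts sum to the length exactly when every character is a spacer
lemma counts_sum_eq_length_iff (l : List Char) :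
    (l.count ' ' + l.count '/' + l.count '|' + l.count '↓' + l.count '-' = l.length
      ↔ ∀ c ∈ l, c ∈ ([' ', '/', '|', '↓', '-'] : List Char))
    ∧ l.count ' ' + l.count '/' + l.count '|' + l.count '↓' + l.count '-' ≤ l.length := by
  induction l with
  | nil => simp
  | cons a rest ih =>
      obtain ⟨ih1, ih2⟩ := ih
      by_cases h : a ∈ ([' ', '/', '|', '↓', '-'] : List Char)
      · have hstep : (a::rest).count ' ' + (a::rest).count '/' + (a::rest).count '|'
            + (a::rest).count '↓' + (a::rest).count '-'
            = rest.count ' ' + rest.count '/' + rest.count '|' + rest.count '↓' + rest.count '-' + 1 := by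
          have h' : a = ' ' ∨ a = '/' ∨ a = '|' ∨ a = '↓' ∨ a = '-' := by simpa using h
          rcases h' with rfl | rfl | rfl | rfl | rfl <;> simp <;> omega
        refine ⟨?_, ?_⟩
        · rw [hstep]
          simp only [List.length_cons, List.forall_mem_cons]
          constructor
          · intro he
            exact ⟨h, ih1.mp (by omega)⟩
          · rintro ⟨-, hall⟩
            have := ih1.mpr hall
            omega
        · rw [hstep]; simp only [List.length_cons]; omega
      · have h' : ¬ (a = ' ' ∨ a = '/' ∨ a = '|' ∨ a = '↓' ∨ a = '-') := by simpa using h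
        have hstep : (a::rest).count ' ' + (a::rest).count '/' + (a::rest).count '|'
            + (a::rest).count '↓' + (a::rest).count '-'
            = rest.count ' ' + rest.count '/' + rest.count '|' + rest.count '↓' + rest.count '-' := by
          have e1 : (a == ' ') = false := beq_eq_false_iff_ne.mpr (fun hh => h' (Or.inl hh))
          have e2 : (a == '/') = false := beq_eq_false_iff_ne.mpr (fun hh => h' (Or.inr (Or.inl hh)))
          have e3 : (a == '|') = false := beq_eq_false_iff_ne.mpr (fun hh => h' (Or.inr (Or.inr (Or.inl hh))))
          have e4 : (a == '↓') = false := beq_eq_false_iff_ne.mpr (fun hh => h' (Or.inr (Or.inr (Or.inr (Or.inl hh)))))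
          have e5 : (a == '-') = false := beq_eq_false_iff_ne.mpr (fun hh => h' (Or.inr (Or.inr (Or.inr (Or.inr hh)))))
          simp [List.count_cons, e1, e2, e3, e4, e5]
        refine ⟨?_, ?_⟩
        · rw [hstep]
          simp only [List.length_cons, List.forall_mem_cons]
          constructor
          · intro he
            exact absurd he (by omega)
          · rintro ⟨ha, -⟩
            exact absurd ha h
        · rw [hstep]; simp only [List.length_cons]; omega

-- ===== VERDICT (by name: the statement is the Claim_ definition above) =====
theorem allspacers_spec : Claim_equal_allspacers := by
  intro s _
  unfold Spec_allspacers
  simp only [allspacers, allspacers_alt, loopA_eq_all,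
    PySem.Dict.getD_foldl_insert_add_one]
  have hempty : ∀ c : Char, (PySem.Dict.empty : PySem.Dict Char Int).getD c 0 = 0 := by
    intro c; rfl
  simp only [hempty, zero_add]
  obtain ⟨h1, h2⟩ := counts_sum_eq_length_iff s.toList
  by_cases he : s.toList.isEmpty
  · have : s.toList = [] := by simpa [List.isEmpty_iff] using he
    simp [this]
  · have he' : s.toList.isEmpty = false := by simpa using he
    have hlen : 0 < s.toList.length := by
      cases hl : s.toList with
      | nil => simp [hl] at he'
      | cons a r => simp
    have hsum : ((s.toList.count ' ' : Int) + s.toList.count '/' + s.toList.count '|'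
        + s.toList.count '↓' + s.toList.count '-' = (s.toList.length : Int))
        ↔ (s.toList.count ' ' + s.toList.count '/' + s.toList.count '|'
        + s.toList.count '↓' + s.toList.count '-' = s.toList.length) := by
      omega
    rw [Bool.eq_iff_iff]
    simp only [he', Bool.false_eq_true, if_false, Bool.and_eq_true, decide_eq_true_eq, List.all_eq_true]
    constructor
    · intro h
      refine ⟨hsum.mpr (h1.mpr ?_), hlen⟩
      intro c hc
      have := h c hc
      simpa [PySem.Set.contains, PySem.Set.mem_ofList] using this
    · rintro ⟨ht, -⟩
      intro c hc
      have := h1.mp (hsum.mp ht) c hc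
      simpa [PySem.Set.contains, PySem.Set.mem_ofList] using this
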